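-- pv_equiv track=rewrite | github.com/snumprlab/pred | PRED/TfD/shell_script_generator.py | generate_commands
-- ===== SOURCE A (Python) =====
-- def generate_commands(num_gpu, unseen_episodes, seen_episodes, num_code_per_gpu=6):
--     commands = []
--     seen_ep = 0
--     unseen_ep = 0
--     seen_gap_per_gpu = seen_episodes // num_gpu
--     unseen_gap_per_gpu = unseen_episodes // num_gpu
--     seen_gap = seen_gap_per_gpu // num_code_per_gpu
--     unseen_gap = unseen_gap_per_gpu // num_code_per_gpu
--
--     for gpu in range(num_gpu):
--         for i in range(num_code_per_gpu):
--             if gpu  == num_gpu - 1 and i == num_code_per_gpu - 1: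
--                 command = (
--                     f"(bash validation_seen_tfd.sh {gpu} {seen_ep} {seen_episodes_total} && "
--                     f"bash validation_unseen_tfd.sh {gpu} {unseen_ep} {unseen_episodes_total})&"
--                 )
--             elif i == num_code_per_gpu - 1:
--                 command = (
--                     f"(bash validation_seen_tfd.sh {gpu} {seen_ep} {seen_gap_per_gpu*(gpu+1)} && "
--                     f"bash validation_unseen_tfd.sh {gpu} {unseen_ep} {unseen_gap_per_gpu*(gpu+1)})&"
--                 )
--                 seen_ep = seen_gap_per_gpu*(gpu+1)
--                 unseen_ep = unseen_gap_per_gpu*(gpu+1)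
--             else:
--                 command = (
--                     f"(bash validation_seen_tfd.sh {gpu} {seen_ep} {seen_ep + seen_gap} && "
--                     f"bash validation_unseen_tfd.sh {gpu} {unseen_ep} {unseen_ep + unseen_gap})&"
--                 )
--                 seen_ep += seen_gap
--                 unseen_ep += unseen_gap
--             commands.append(command)
--
--         commands.append("\n")
--     return commands
--
-- unseen_episodes_total = 269
--
-- seen_episodes_total = 77
-- ===== SOURCE B (Python) =====
-- unseen_episodes_total = 269
--
-- seen_episodes_total = 77
--
--
-- def generate_commands(num_gpu, unseen_episodes, seen_episodes, num_code_per_gpu=6):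
--     # Closed-form slot boundaries instead of A's running seen_ep/unseen_ep accumulators.
--     sgp = seen_episodes // num_gpu
--     ugp = unseen_episodes // num_gpu
--     sg = sgp // num_code_per_gpu
--     ug = ugp // num_code_per_gpu
--
--     def slot(gpu, i):
--         s0 = sgp * gpu + i * sg
--         u0 = ugp * gpu + i * ug
--         if i == num_code_per_gpu - 1:
--             if gpu == num_gpu - 1:
--                 s1, u1 = seen_episodes_total, unseen_episodes_total
--             else:
--                 s1, u1 = sgp * (gpu + 1), ugp * (gpu + 1)
--         else:
--             s1, u1 = s0 + sg, u0 + ug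
--         return (f"(bash validation_seen_tfd.sh {gpu} {s0} {s1} && "
--                 f"bash validation_unseen_tfd.sh {gpu} {u0} {u1})&")
--
--     return [cmd for gpu in range(num_gpu)
--                 for cmd in [slot(gpu, i) for i in range(num_code_per_gpu)] + ["\n"]]
-- ===== Notes on version B (the rewrite author's own statement) =====
-- stated objective: alternative
-- what changed: Replaced the running seen_ep/unseen_ep accumulators with closed-form slot boundaries computed by index arithmetic (start = gap_per_gpu*gpu + i*gap), emitting the command list as a comprehension over (gpu, slot) pairs.
import Mathlib
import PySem

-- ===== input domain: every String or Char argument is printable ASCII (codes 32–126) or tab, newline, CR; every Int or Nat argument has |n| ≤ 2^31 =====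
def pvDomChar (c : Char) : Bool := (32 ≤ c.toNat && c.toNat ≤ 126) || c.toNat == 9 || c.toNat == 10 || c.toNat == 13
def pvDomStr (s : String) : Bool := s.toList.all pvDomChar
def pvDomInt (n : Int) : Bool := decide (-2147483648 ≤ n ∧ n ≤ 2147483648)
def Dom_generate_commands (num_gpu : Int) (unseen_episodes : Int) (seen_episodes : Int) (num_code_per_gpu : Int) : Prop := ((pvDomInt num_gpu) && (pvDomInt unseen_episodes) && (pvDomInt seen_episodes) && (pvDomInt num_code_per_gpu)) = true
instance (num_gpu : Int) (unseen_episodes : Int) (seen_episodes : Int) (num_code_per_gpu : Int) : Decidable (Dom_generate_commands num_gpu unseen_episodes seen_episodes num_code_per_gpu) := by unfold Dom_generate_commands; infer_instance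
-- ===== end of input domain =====

-- B replaces A's running seen_ep/unseen_ep accumulators with closed-form slot boundaries
-- computed by index arithmetic (alternative decomposition, same cost).

-- ===== PORT A =====
-- the f-string both Pythons share (module constants seen_episodes_total = 77, unseen_episodes_total = 269)
def pvCmd (gpu s0 s1 u0 u1 : Int) : String :=
  "(bash validation_seen_tfd.sh " ++ PySem.Int.toStr gpu ++ " " ++ PySem.Int.toStr s0 ++ " " ++
    PySem.Int.toStr s1 ++ " && bash validation_unseen_tfd.sh " ++ PySem.Int.toStr gpu ++ " " ++
    PySem.Int.toStr u0 ++ " " ++ PySem.Int.toStr u1 ++ ")&"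

-- body of A's inner `for i in range(num_code_per_gpu)` loop, state = (commands, seen_ep, unseen_ep)
def pvAStep (num_gpu n sgp ugp sg ug gpu : Int) (st : List String × Int × Int) (i : Int) :
    List String × Int × Int :=
  if gpu = num_gpu - 1 ∧ i = n - 1 then
    (st.1 ++ [pvCmd gpu st.2.1 77 st.2.2 269], st.2.1, st.2.2)
  else if i = n - 1 then
    (st.1 ++ [pvCmd gpu st.2.1 (sgp * (gpu + 1)) st.2.2 (ugp * (gpu + 1))],
      sgp * (gpu + 1), ugp * (gpu + 1))
  else
    (st.1 ++ [pvCmd gpu st.2.1 (st.2.1 + sg) st.2.2 (st.2.2 + ug)], st.2.1 + sg, st.2.2 + ug)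

-- body of A's outer `for gpu in range(num_gpu)` loop (run the inner loop, then append "\n")
def pvAGpu (num_gpu n sgp ugp sg ug : Int) (st : List String × Int × Int) (gpu : Int) :
    List String × Int × Int :=
  let st2 := (PySem.List.pyRange 0 n 1).foldl (pvAStep num_gpu n sgp ugp sg ug gpu) st
  (st2.1 ++ ["\n"], st2.2)

def generate_commands (num_gpu : Int) (unseen_episodes : Int) (seen_episodes : Int) (num_code_per_gpu : Int) : List String :=
  let sgp := PySem.Int.floordiv seen_episodes num_gpu
  let ugp := PySem.Int.floordiv unseen_episodes num_gpu
  let sg := PySem.Int.floordiv sgp num_code_per_gpu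
  let ug := PySem.Int.floordiv ugp num_code_per_gpu
  ((PySem.List.pyRange 0 num_gpu 1).foldl
    (pvAGpu num_gpu num_code_per_gpu sgp ugp sg ug) ([], 0, 0)).1

-- ===== PORT B =====
-- B's closed-form slot: start = gap_per_gpu*gpu + i*gap, end by the last/global-last rule
def pvBSlot (num_gpu n sgp ugp sg ug gpu i : Int) : String :=
  let s0 := sgp * gpu + i * sg
  let u0 := ugp * gpu + i * ug
  if i = n - 1 then
    if gpu = num_gpu - 1 then pvCmd gpu s0 77 u0 269
    else pvCmd gpu s0 (sgp * (gpu + 1)) u0 (ugp * (gpu + 1))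
  else pvCmd gpu s0 (s0 + sg) u0 (u0 + ug)

def generate_commands_alt (num_gpu : Int) (unseen_episodes : Int) (seen_episodes : Int) (num_code_per_gpu : Int) : List String :=
  let sgp := PySem.Int.floordiv seen_episodes num_gpu
  let ugp := PySem.Int.floordiv unseen_episodes num_gpu
  let sg := PySem.Int.floordiv sgp num_code_per_gpu
  let ug := PySem.Int.floordiv ugp num_code_per_gpu
  (PySem.List.pyRange 0 num_gpu 1).flatMap (fun gpu =>
    (PySem.List.pyRange 0 num_code_per_gpu 1).map
      (pvBSlot num_gpu num_code_per_gpu sgp ugp sg ug gpu) ++ ["\n"])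

-- ===== PRECONDITION & SPEC =====
-- A raises ZeroDivisionError iff num_gpu == 0 or num_code_per_gpu == 0 (the '//' gap computations); B raises there too.
def Pre_generate_commands (num_gpu : Int) (unseen_episodes : Int) (seen_episodes : Int) (num_code_per_gpu : Int) : Prop :=
  num_gpu ≠ 0 ∧ num_code_per_gpu ≠ 0
instance (num_gpu : Int) (unseen_episodes : Int) (seen_episodes : Int) (num_code_per_gpu : Int) : Decidable (Pre_generate_commands num_gpu unseen_episodes seen_episodes num_code_per_gpu) := by unfold Pre_generate_commands; infer_instance

def pvWitness_generate_commands : Int × Int × Int × Int := (2, 269, 77, 3)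

def Spec_generate_commands (num_gpu : Int) (unseen_episodes : Int) (seen_episodes : Int) (num_code_per_gpu : Int) (out : List String) : Prop := out = generate_commands_alt num_gpu unseen_episodes seen_episodes num_code_per_gpu
instance (num_gpu : Int) (unseen_episodes : Int) (seen_episodes : Int) (num_code_per_gpu : Int) (out : List String) : Decidable (Spec_generate_commands num_gpu unseen_episodes seen_episodes num_code_per_gpu out) := by unfold Spec_generate_commands; infer_instance

-- ===== CLAIM (what is proved, stated in full; the proofs are below) =====
def Claim_equal_generate_commands : Prop := ∀ (num_gpu : Int) (unseen_episodes : Int) (seen_episodes : Int) (num_code_per_gpu : Int), Dom_generate_commands num_gpu unseen_episodes seen_episodes num_code_per_gpu → Pre_generate_commands num_gpu unseen_episodes seen_episodes num_code_per_gpu → Spec_generate_commands num_gpu unseen_episodes seen_episodes num_code_per_gpu (generate_commands num_gpu unseen_episodes seen_episodes num_code_per_gpu)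

-- ===== LEMMAS AND PROOFS =====

-- the prefix of the inner loop (no index reaches n-1) advances the accumulators linearly
lemma pvInner_pre (num_gpu n sgp ugp sg ug gpu : Int) :
    ∀ (m : Nat) (a : Int) (acc : List String) (s u : Int), a + m ≤ n - 1 →
    (PySem.List.pyRange a (a + m) 1).foldl (pvAStep num_gpu n sgp ugp sg ug gpu) (acc, s, u)
      = (acc ++ (PySem.List.pyRange a (a + m) 1).map
            (fun i => pvCmd gpu (s + (i - a) * sg) (s + (i - a) * sg + sg)
                             (u + (i - a) * ug) (u + (i - a) * ug + ug)),
          s + m * sg, u + m * ug) := by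
  intro m
  induction m with
  | zero =>
    intro a acc s u _
    simp
  | succ m ih =>
    intro a acc s u h
    have hcons : PySem.List.pyRange a (a + (m+1:Nat)) 1
        = a :: PySem.List.pyRange (a+1) (a + (m+1:Nat)) 1 :=
      PySem.List.pyRange_one_cons (by push_cast; omega)
    have hane : ¬ (a = n - 1) := by push_cast at h; omega
    have hstep : pvAStep num_gpu n sgp ugp sg ug gpu (acc, s, u) a
        = (acc ++ [pvCmd gpu s (s + sg) u (u + ug)], s + sg, u + ug) := by
      simp [pvAStep, hane]
    have hEnd : a + (m+1:Nat) = (a+1) + (m:Nat) := by push_cast; ring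
    rw [hcons]
    simp only [List.foldl_cons, hstep, hEnd]
    rw [ih (a+1) _ _ _ (by push_cast at h ⊢; omega)]
    simp only [Prod.mk.injEq]
    refine ⟨?_, ?_, ?_⟩
    · rw [List.map_cons, List.append_assoc, List.singleton_append]
      simp only [sub_self, zero_mul, add_zero]
      have hmap : (PySem.List.pyRange (a+1) ((a+1) + (m:Nat)) 1).map
            (fun i => pvCmd gpu (s + sg + (i - (a+1)) * sg) (s + sg + (i - (a+1)) * sg + sg)
                             (u + ug + (i - (a+1)) * ug) (u + ug + (i - (a+1)) * ug + ug))
          = (PySem.List.pyRange (a+1) ((a+1) + (m:Nat)) 1).map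
            (fun i => pvCmd gpu (s + (i - a) * sg) (s + (i - a) * sg + sg)
                             (u + (i - a) * ug) (u + (i - a) * ug + ug)) := by
        apply List.map_congr_left
        intro i _
        have h1 : s + sg + (i - (a+1)) * sg = s + (i - a) * sg := by ring
        have h2 : u + ug + (i - (a+1)) * ug = u + (i - a) * ug := by ring
        rw [h1, h2]
      rw [hmap]
    · push_cast; ring
    · push_cast; ring

-- one full pass of A's inner loop starting from the closed-form state equals B's slot map
lemma pvInner_full (num_gpu n sgp ugp sg ug gpu : Int) (hn : 1 ≤ n)
    (acc : List String) :
    (PySem.List.pyRange 0 n 1).foldl (pvAStep num_gpu n sgp ugp sg ug gpu)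
        (acc, sgp * gpu, ugp * gpu)
      = (acc ++ (PySem.List.pyRange 0 n 1).map (pvBSlot num_gpu n sgp ugp sg ug gpu),
          if gpu = num_gpu - 1 then (sgp * gpu + (n-1) * sg, ugp * gpu + (n-1) * ug)
          else (sgp * (gpu + 1), ugp * (gpu + 1))) := by
  have hm : (((n-1).toNat : Int)) = n - 1 := by omega
  have hsplit : PySem.List.pyRange 0 n 1 = PySem.List.pyRange 0 (n-1) 1 ++ [n-1] := by
    have h := PySem.List.pyRange_one_succ_right (a := 0) (b := n-1) (by omega)
    rw [sub_add_cancel] at h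
    exact h
  have hpre0 : PySem.List.pyRange 0 (n-1) 1 = PySem.List.pyRange 0 (0 + ((n-1).toNat : Int)) 1 := by
    rw [hm]; ring_nf
  rw [hsplit, List.foldl_append, hpre0,
    pvInner_pre num_gpu n sgp ugp sg ug gpu (n-1).toNat 0 acc (sgp*gpu) (ugp*gpu) (by omega)]
  rw [← hpre0, hm]
  simp only [List.foldl_cons, List.foldl_nil]
  have hmapPre : (PySem.List.pyRange 0 (n-1) 1).map
      (fun i => pvCmd gpu (sgp*gpu + (i - 0) * sg) (sgp*gpu + (i - 0) * sg + sg)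
                       (ugp*gpu + (i - 0) * ug) (ugp*gpu + (i - 0) * ug + ug))
      = (PySem.List.pyRange 0 (n-1) 1).map (pvBSlot num_gpu n sgp ugp sg ug gpu) := by
    apply List.map_congr_left
    intro i hi
    rw [PySem.List.mem_pyRange_one] at hi
    simp only [pvBSlot, sub_zero]
    rw [if_neg (by omega)]
  rw [hmapPre]
  by_cases hg : gpu = num_gpu - 1
  · rw [pvAStep]
    rw [if_pos ⟨hg, rfl⟩]
    simp only [List.map_append, List.map_cons, List.map_nil, List.append_assoc]
    simp only [Prod.mk.injEq, pvBSlot, if_pos hg]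
    trivial
  · rw [pvAStep]
    rw [if_neg (by tauto), if_pos rfl]
    simp only [List.map_append, List.map_cons, List.map_nil, List.append_assoc]
    simp only [Prod.mk.injEq, pvBSlot, if_neg hg]
    trivial

-- A's outer loop from gpu g with the invariant state (sgp*g, ugp*g) produces B's flatMap (n ≥ 1)
lemma pvOuter (num_gpu n sgp ugp sg ug : Int) (hn : 1 ≤ n) :
    ∀ (k : Nat) (g : Int) (acc : List String), g + k = num_gpu →
    ((PySem.List.pyRange g (g + k) 1).foldl (pvAGpu num_gpu n sgp ugp sg ug)
        (acc, sgp * g, ugp * g)).1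
      = acc ++ (PySem.List.pyRange g (g + k) 1).flatMap (fun gpu =>
          (PySem.List.pyRange 0 n 1).map (pvBSlot num_gpu n sgp ugp sg ug gpu) ++ ["\n"]) := by
  intro k
  induction k with
  | zero =>
    intro g acc _
    simp
  | succ k ih =>
    intro g acc hend
    have hcons : PySem.List.pyRange g (g + (k+1:Nat)) 1
        = g :: PySem.List.pyRange (g+1) (g + (k+1:Nat)) 1 :=
      PySem.List.pyRange_one_cons (by push_cast; omega)
    have hEnd : g + (k+1:Nat) = (g+1) + (k:Nat) := by push_cast; ring
    rw [hcons]
    simp only [List.foldl_cons, List.flatMap_cons]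
    rw [pvAGpu]
    rw [pvInner_full num_gpu n sgp ugp sg ug g hn acc]
    by_cases hg : g = num_gpu - 1
    · have hk0 : k = 0 := by omega
      subst hk0
      rw [if_pos hg]
      have hnil : PySem.List.pyRange (g+1) ((g+1) + (0:Nat)) 1 = [] :=
        PySem.List.pyRange_one_eq_nil (by omega)
      rw [hEnd, hnil]
      simp
    · rw [if_neg hg, hEnd]
      rw [ih (g+1) _ (by push_cast at hend ⊢; omega)]
      simp

-- n ≤ 0 case: the inner loop is empty, every gpu contributes exactly "\n"
lemma pvOuter_nil (num_gpu n sgp ugp sg ug : Int) (hn : n ≤ 0) :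
    ∀ (k : Nat) (g : Int) (acc : List String) (s u : Int),
    ((PySem.List.pyRange g (g + k) 1).foldl (pvAGpu num_gpu n sgp ugp sg ug) (acc, s, u)).1
      = acc ++ (PySem.List.pyRange g (g + k) 1).flatMap (fun gpu =>
          (PySem.List.pyRange 0 n 1).map (pvBSlot num_gpu n sgp ugp sg ug gpu) ++ ["\n"]) := by
  have hinner : PySem.List.pyRange 0 n 1 = [] := PySem.List.pyRange_one_eq_nil (by omega)
  intro k
  induction k with
  | zero =>
    intro g acc s u
    simp
  | succ k ih =>
    intro g acc s u
    have hcons : PySem.List.pyRange g (g + (k+1:Nat)) 1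
        = g :: PySem.List.pyRange (g+1) (g + (k+1:Nat)) 1 :=
      PySem.List.pyRange_one_cons (by push_cast; omega)
    have hEnd : g + (k+1:Nat) = (g+1) + (k:Nat) := by push_cast; ring
    rw [hcons]
    simp only [List.foldl_cons, List.flatMap_cons]
    rw [pvAGpu, hinner]
    simp only [List.foldl_nil, List.map_nil, List.nil_append, hEnd]
    rw [ih (g+1) _ s u]
    simp [hinner]

lemma pvMain (num_gpu unseen_episodes seen_episodes num_code_per_gpu : Int) :
    generate_commands num_gpu unseen_episodes seen_episodes num_code_per_gpu
      = generate_commands_alt num_gpu unseen_episodes seen_episodes num_code_per_gpu := by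
  unfold generate_commands generate_commands_alt
  set sgp := PySem.Int.floordiv seen_episodes num_gpu with hsgp
  set ugp := PySem.Int.floordiv unseen_episodes num_gpu with hugp
  set sg := PySem.Int.floordiv sgp num_code_per_gpu with hsg
  set ug := PySem.Int.floordiv ugp num_code_per_gpu with hug
  by_cases hpos : 0 < num_gpu
  · have h0 : (0:Int) + (num_gpu.toNat : Int) = num_gpu := by omega
    by_cases hn : 1 ≤ num_code_per_gpu
    · have h := pvOuter num_gpu num_code_per_gpu sgp ugp sg ug hn num_gpu.toNat 0 [] (by omega)
      rw [h0] at h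
      simpa using h
    · have h := pvOuter_nil num_gpu num_code_per_gpu sgp ugp sg ug (by omega) num_gpu.toNat 0 [] 0 0
      rw [h0] at h
      simpa using h
  · have hnil : PySem.List.pyRange 0 num_gpu 1 = [] :=
      PySem.List.pyRange_one_eq_nil (by omega)
    rw [hnil]
    simp

-- ===== VERDICT (by name: the statement is the Claim_ definition above) =====
theorem generate_commands_spec : Claim_equal_generate_commands := by
  intro num_gpu unseen_episodes seen_episodes num_code_per_gpu _ _
  exact pvMain num_gpu unseen_episodes seen_episodes num_code_per_gpu
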